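-- pv_equiv track=rewrite | github.com/juneaume/test | IUNhydroponics/Python_test_codes/plot_program.py | xtickval
-- ===== SOURCE A (Python) =====
-- def xtickval(value):
-- 	toUse = []
-- 	for i in range(len(value)):
-- 		if len(value) <= 25:
-- 			toUse.append(value[i])
-- 		elif len(value) > 25 and len(value) < 300:
-- 			if (i % 8 == 0) == True:
-- 				toUse.append(value[i])
-- 		elif len(value) >= 300:
-- 			if (i % 50 == 0) == True:
-- 				toUse.append(value[i])
--
-- 	return toUse
-- ===== SOURCE B (Python) =====
-- def xtickval(value):
--     n = len(value)
--     step = 1 if n <= 25 else (8 if n < 300 else 50)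
--     return list(value[::step])
-- ===== Notes on version B (the rewrite author's own statement) =====
-- stated objective: simpler
-- what changed: The per-index loop that re-tests len(value) and a modulo condition on every iteration is replaced by computing the stride once and taking a single strided slice value[::step].
import Mathlib
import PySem

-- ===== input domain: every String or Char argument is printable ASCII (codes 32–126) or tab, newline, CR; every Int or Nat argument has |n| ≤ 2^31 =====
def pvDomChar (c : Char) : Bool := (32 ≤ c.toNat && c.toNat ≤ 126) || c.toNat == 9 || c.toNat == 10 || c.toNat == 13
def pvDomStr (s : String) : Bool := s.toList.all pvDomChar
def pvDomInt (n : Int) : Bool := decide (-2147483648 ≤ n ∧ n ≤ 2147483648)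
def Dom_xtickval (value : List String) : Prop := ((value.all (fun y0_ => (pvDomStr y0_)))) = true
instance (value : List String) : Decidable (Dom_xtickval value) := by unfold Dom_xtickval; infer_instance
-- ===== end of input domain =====

-- B replaces A's per-index loop (which re-tests len(value) and a modulo on every index)
-- by computing the stride once and taking one strided slice; objective: simpler.


-- ===== PORT A =====
def xtickval (value : List String) : List String :=
  (PySem.List.pyRange 0 (PySem.List.len value)).foldl
    (fun toUse i =>
      if PySem.List.len value ≤ 25 then
        toUse ++ [PySem.List.pyGetD value i ""]
      else if 25 < PySem.List.len value ∧ PySem.List.len value < 300 then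
        (if ((PySem.Int.mod i 8 == 0) == true) then toUse ++ [PySem.List.pyGetD value i ""] else toUse)
      else if 300 ≤ PySem.List.len value then
        (if ((PySem.Int.mod i 50 == 0) == true) then toUse ++ [PySem.List.pyGetD value i ""] else toUse)
      else toUse) []

-- ===== PORT B =====
def xtickval_alt (value : List String) : List String :=
  let n := PySem.List.len value
  let step : Int := if n ≤ 25 then 1 else if n < 300 then 8 else 50
  (PySem.List.slice? value none none step).getD []

-- ===== PRECONDITION & SPEC =====
def Spec_xtickval (value : List String) (out : List String) : Prop := out = xtickval_alt value
instance (value : List String) (out : List String) : Decidable (Spec_xtickval value out) := by unfold Spec_xtickval; infer_instance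

-- ===== CLAIM (what is proved, stated in full; the proofs are below) =====
def Claim_equal_xtickval : Prop := ∀ (value : List String), Dom_xtickval value → Spec_xtickval value (xtickval value)

-- ===== LEMMAS AND PROOFS =====

-- ceiling-division helpers
lemma pv_ceil_dvd {st n : ℕ} (h : 0 < st) (hd : st ∣ n) : (n + st - 1) / st = n / st := by
  obtain ⟨q, rfl⟩ := hd
  rw [Nat.mul_comm]
  have h1 : q * st + st - 1 = q * st + (st - 1) := by omega
  rw [h1, Nat.mul_comm, Nat.mul_add_div h, Nat.mul_div_cancel_left _ h,
    Nat.div_eq_of_lt (by omega)]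
  omega

lemma pv_ceil_not_dvd {st n : ℕ} (h : 0 < st) (hd : ¬ st ∣ n) : (n + st - 1) / st = n / st + 1 := by
  obtain ⟨q, r, hqr, hrlt, hr0⟩ : ∃ q r, n = st * q + r ∧ r < st ∧ r ≠ 0 := by
    exact ⟨n / st, n % st, (Nat.div_add_mod n st).symm, Nat.mod_lt _ h,
      fun hc => hd (Nat.dvd_of_mod_eq_zero hc)⟩
  subst hqr
  have h1 : st * q + r + st - 1 = st * (q + 1) + (r - 1) := by
    have he : st * (q + 1) = st * q + st := by ring
    generalize st * (q + 1) = m1 at he ⊢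
    generalize st * q = m2 at he ⊢
    omega
  rw [h1, Nat.mul_add_div h, Nat.mul_add_div h,
    Nat.div_eq_of_lt hrlt, Nat.div_eq_of_lt (show r - 1 < st by omega)]

-- the indices that A keeps are exactly the multiples of the stride
lemma pv_filter_range_mod (st : ℕ) (h : 0 < st) (n : ℕ) :
    (List.range n).filter (fun k => k % st == 0) =
      (List.range ((n + st - 1) / st)).map (fun k => st * k) := by
  induction n with
  | zero =>
    simp
    omega
  | succ n ih =>
    have hceil : (n + 1 + st - 1) / st = n / st + 1 := by
      have : n + 1 + st - 1 = n + st := by omega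
      rw [this, Nat.add_div_right _ h]
    rw [List.range_succ, List.filter_append, ih]
    by_cases hd : st ∣ n
    · rw [hceil, pv_ceil_dvd h hd, List.range_succ, List.map_append]
      have hfil : List.filter (fun k => k % st == 0) [n] = [st * (n / st)] := by
        simp [List.filter, Nat.mod_eq_zero_of_dvd hd, Nat.mul_div_cancel' hd]
      rw [hfil]
      simp
    · have hne : ¬ (n % st = 0) := fun hc => hd (Nat.dvd_of_mod_eq_zero hc)
      rw [hceil, ← pv_ceil_not_dvd h hd]
      have hb : (n % st == 0) = false := by simpa using hne
      simp [List.filter, hb]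

lemma pv_lt_of_lt_ceil {st n k : ℕ} (h : 0 < st) (hk : k < (n + st - 1) / st) : st * k < n := by
  have h1 : k + 1 ≤ (n + st - 1) / st := hk
  have h2 : (k + 1) * st ≤ n + st - 1 := (Nat.le_div_iff_mul_le h).mp h1
  have h3 : (k + 1) * st = k * st + st := by ring
  have h4 : st * k = k * st := by ring
  omega

-- evaluate value[::st] for a positive literal stride
lemma pv_slice?_pos (xs : List String) (st : ℕ) (h : 0 < st) :
    PySem.List.slice? xs none none (st : ℤ) =
      some ((List.range ((xs.length + st - 1) / st)).filterMap (fun k => xs[st * k]?)) := by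
  have hst0 : (st : ℤ) ≠ 0 := by exact_mod_cast h.ne'
  simp only [PySem.List.slice?, PySem.List.sliceIndices, hst0]
  have hneg : ¬ ((st : ℤ) < 0) := Int.not_lt.mpr (by positivity)
  have hpos : (0 : ℤ) < (st : ℤ) := by exact_mod_cast h
  simp only [hneg, hpos, if_false, if_pos]
  by_cases hn : 0 < xs.length
  · have hlt : (0 : ℤ) < (xs.length : ℤ) := by exact_mod_cast hn
    simp only [hlt, if_pos]
    have hcount : (((xs.length : ℤ) - 0 + (st : ℤ) - 1) / (st : ℤ)).toNat
        = (xs.length + st - 1) / st := by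
      have h1 : ((xs.length : ℤ) - 0 + (st : ℤ) - 1) = ((xs.length + st - 1 : ℕ) : ℤ) := by
        push_cast [Nat.cast_sub (by omega : 1 ≤ xs.length + st)]; ring
      rw [h1]
      have : (((xs.length + st - 1 : ℕ) : ℤ) / ((st : ℕ) : ℤ)) = (((xs.length + st - 1) / st : ℕ) : ℤ) := by
        push_cast; ring
      rw [this, Int.toNat_natCast]
    rw [hcount]
    congr 1
    apply List.filterMap_congr
    intro k _
    congr 1
    have : (0 + (st : ℤ) * (k : ℕ)) = ((st * k : ℕ) : ℤ) := by push_cast; ring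
    rw [this, Int.toNat_natCast]
  · have hxs : xs = [] := List.eq_nil_of_length_eq_zero (by omega)
    subst hxs
    simp

lemma pv_map_getD_range (xs : List String) (d : String) :
    (List.range xs.length).map (fun k => xs.getD k d) = xs := by
  apply List.ext_getElem (by simp)
  intro i h1 h2
  simp only [List.getElem_map, List.getElem_range]
  exact List.getD_eq_getElem xs d h2

-- common normal form: value[::st] as A's filtered index loop
lemma pv_stride_eq (xs : List String) (st : ℕ) (h : 0 < st) :
    (PySem.List.slice? xs none none (st : ℤ)).getD [] =
      ((List.range xs.length).filter (fun k => k % st == 0)).map (fun k => xs.getD k "") := by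
  rw [pv_slice?_pos xs st h, Option.getD_some, pv_filter_range_mod st h, List.map_map]
  have : (List.filterMap (fun k => xs[st * k]?) (List.range ((xs.length + st - 1) / st)))
      = (List.range ((xs.length + st - 1) / st)).map (fun k => xs.getD (st * k) "") := by
    rw [← List.filterMap_eq_map]
    apply List.filterMap_congr
    intro k hk
    have hlt : st * k < xs.length := pv_lt_of_lt_ceil h (List.mem_range.mp hk)
    simp [List.getD_eq_getElem _ _ hlt, List.getElem?_eq_getElem hlt]
  rw [this]
  rfl

-- A's index list, cast down to Nat
lemma pv_pyRange_len (xs : List String) :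
    PySem.List.pyRange 0 (PySem.List.len xs) = (List.range xs.length).map (Nat.cast : ℕ → ℤ) := by
  rw [PySem.List.len, PySem.List.pyRange_one]
  simp only [Int.sub_zero, Int.toNat_natCast, zero_add]

lemma pv_mod_cast (k st : ℕ) :
    ((PySem.Int.mod (k : ℤ) (st : ℕ) == 0) == true) = (k % st == 0) := by
  have hio : ((st : ℕ) : ℤ) ∣ (k : ℤ) ↔ st ∣ k := Int.natCast_dvd_natCast
  simp only [PySem.Int.mod, Int.fmod_eq_emod]
  by_cases hd : st ∣ k
  · simp [hio.mpr hd, Nat.mod_eq_zero_of_dvd hd]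
  · have h1 : ¬ (k % st = 0) := fun hc => hd (Nat.dvd_of_mod_eq_zero hc)
    have h2 : ¬ ((k : ℤ) % (st : ℤ) = 0) := by
      rw [← Int.natCast_mod]; exact_mod_cast h1
    simp [hio, hd, h2, h1]

-- A's loop with a fixed modulo branch, as the same filtered map
lemma pv_loopA (xs : List String) (st : ℕ) :
    (PySem.List.pyRange 0 (PySem.List.len xs)).foldl
      (fun toUse i => if ((PySem.Int.mod i (st : ℕ) == 0) == true)
         then toUse ++ [PySem.List.pyGetD xs i ""] else toUse) [] =
      ((List.range xs.length).filter (fun k => k % st == 0)).map (fun k => xs.getD k "") := by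
  rw [PySem.List.foldl_append_if (fun i => ((PySem.Int.mod i (st : ℕ) == 0) == true))
      (fun i => PySem.List.pyGetD xs i "") _ []]
  rw [pv_pyRange_len, List.filter_map, List.map_map]
  simp only [List.nil_append, Function.comp_def]
  rw [List.filter_congr (fun k _ => pv_mod_cast k st)]
  exact List.map_congr_left (fun k _ => PySem.List.pyGetD_natCast xs k "")

-- ===== VERDICT (by name: the statement is the Claim_ definition above) =====
theorem xtickval_spec : Claim_equal_xtickval := by
  intro value _
  unfold Spec_xtickval xtickval xtickval_alt
  simp only [PySem.List.len]
  by_cases h1 : (value.length : ℤ) ≤ 25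
  · have hs := pv_stride_eq value 1 (by omega)
    simp only [Nat.cast_one] at hs
    simp only [h1, if_true]
    rw [hs]
    have hA : (PySem.List.pyRange 0 (PySem.List.len value)).foldl
        (fun toUse i => toUse ++ [PySem.List.pyGetD value i ""]) [] = value := by
      rw [PySem.List.foldl_append_singleton_eq_map, PySem.List.len,
        PySem.List.map_pyGetD_pyRange_zero']
      rfl
    rw [PySem.List.len] at hA
    rw [hA]
    have hfil : List.filter (fun k => k % 1 == 0) (List.range value.length)
        = List.range value.length :=
      List.filter_eq_self.mpr (fun a _ => by simp [Nat.mod_one])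
    rw [hfil]
    exact (pv_map_getD_range value "").symm
  · by_cases h2 : (value.length : ℤ) < 300
    · have hand : 25 < (value.length : ℤ) ∧ (value.length : ℤ) < 300 := ⟨by omega, h2⟩
      have hs := pv_stride_eq value 8 (by omega)
      simp only [Nat.cast_ofNat] at hs
      simp only [h1, h2, hand, if_true, if_false, and_self]
      rw [hs]
      have hl := pv_loopA value 8
      simp only [Nat.cast_ofNat, PySem.List.len] at hl
      rw [← hl]
    · have h3 : (300 : ℤ) ≤ (value.length : ℤ) := by omega
      have hand : ¬ (25 < (value.length : ℤ) ∧ (value.length : ℤ) < 300) := by omega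
      simp only [h1, h2, h3, hand, if_true, if_false, and_false]
      have hs := pv_stride_eq value 50 (by omega)
      simp only [Nat.cast_ofNat] at hs
      rw [hs]
      have hl := pv_loopA value 50
      simp only [Nat.cast_ofNat, PySem.List.len] at hl
      rw [← hl]
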